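-- pv_equiv track=rewrite | github.com/Rajasekhar1131997/TIP102_Sessions | Week2Session1_SPSV1.py | num_VIP_guests
-- ===== SOURCE A (Python) =====
-- def num_VIP_guests(vip_passes, guests):
--     vip_set = set()
--     for i in vip_passes:
--         vip_set.add(i)
--     count = 0
--     for char in guests:
--         if char in vip_set:
--             count += 1
--     return count
-- ===== SOURCE B (Python) =====
-- def num_VIP_guests(vip_passes, guests):
--     vips = set(vip_passes)
--     counts = {}
--     for g in guests:
--         counts[g] = counts.get(g, 0) + 1
--     total = 0
--     for g, c in counts.items():
--         if g in vips:
--             total += c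
--     return total
-- ===== Notes on version B (the rewrite author's own statement) =====
-- stated objective: alternative
-- what changed: B builds a frequency table of guests in one pass and then sums the multiplicities of the distinct guests that hold a VIP pass, instead of testing every guest occurrence against the VIP set.
import Mathlib
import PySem

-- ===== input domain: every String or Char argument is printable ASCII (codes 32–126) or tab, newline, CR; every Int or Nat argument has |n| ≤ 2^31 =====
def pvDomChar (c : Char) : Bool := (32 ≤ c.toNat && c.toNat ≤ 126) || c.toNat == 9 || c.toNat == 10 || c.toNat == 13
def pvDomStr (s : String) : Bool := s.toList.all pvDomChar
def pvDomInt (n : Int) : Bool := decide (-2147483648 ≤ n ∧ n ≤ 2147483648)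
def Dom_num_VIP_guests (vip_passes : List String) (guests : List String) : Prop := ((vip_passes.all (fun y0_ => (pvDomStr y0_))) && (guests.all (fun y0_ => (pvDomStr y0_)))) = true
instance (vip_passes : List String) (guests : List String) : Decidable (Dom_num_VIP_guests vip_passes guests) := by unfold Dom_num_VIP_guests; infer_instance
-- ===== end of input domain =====

-- B replaces A's per-occurrence VIP test with a one-pass frequency table of guests,
-- then sums the multiplicities of the distinct guests holding a VIP pass (alternative decomposition).


-- ===== PORT A =====
def num_VIP_guests (vip_passes : List String) (guests : List String) : Int :=
  let vip_set : PySem.Set String := vip_passes.foldl (fun s i => PySem.Set.add s i) PySem.Set.empty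
  guests.foldl (fun count char => if char ∈ vip_set then count + 1 else count) 0

-- ===== PORT B =====
def num_VIP_guests_alt (vip_passes : List String) (guests : List String) : Int :=
  let vips : PySem.Set String := PySem.Set.ofList vip_passes
  let counts : PySem.Dict String Int :=
    guests.foldl (fun d g => d.insert g (d.getD g 0 + 1)) PySem.Dict.empty
  counts.items.foldl (fun total gc => if gc.1 ∈ vips then total + gc.2 else total) 0

-- ===== PRECONDITION & SPEC =====
def Spec_num_VIP_guests (vip_passes : List String) (guests : List String) (out : Int) : Prop := out = num_VIP_guests_alt vip_passes guests
instance (vip_passes : List String) (guests : List String) (out : Int) : Decidable (Spec_num_VIP_guests vip_passes guests out) := by unfold Spec_num_VIP_guests; infer_instance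

-- ===== CLAIM (what is proved, stated in full; the proofs are below) =====
def Claim_equal_num_VIP_guests : Prop := ∀ (vip_passes : List String) (guests : List String), Dom_num_VIP_guests vip_passes guests → Spec_num_VIP_guests vip_passes guests (num_VIP_guests vip_passes guests)

-- ===== LEMMAS AND PROOFS =====

-- A's counting loop, with general accumulator.
theorem foldl_if_count (p : String → Prop) [DecidablePred p] (gs : List String) (c : Int) :
    gs.foldl (fun count g => if p g then count + 1 else count) c
      = c + (gs.countP (fun g => decide (p g)) : Int) := by
  induction gs generalizing c with
  | nil => simp
  | cons g t ih =>
    simp only [List.foldl_cons, List.countP_cons, ih]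
    by_cases h : p g <;> simp [h] <;> try omega

-- B's summing loop, with general accumulator.
theorem foldl_if_add (p : String → Prop) [DecidablePred p] (l : List (String × Int)) (c : Int) :
    l.foldl (fun total gc => if p gc.1 then total + gc.2 else total) c
      = c + (l.map (fun gc => if p gc.1 then gc.2 else 0)).sum := by
  induction l generalizing c with
  | nil => simp
  | cons x t ih =>
    simp only [List.foldl_cons, List.map_cons, List.sum_cons, ih]
    by_cases h : p x.1 <;> simp [h] <;> try ring

theorem countP_or_disjoint (r s : String → Bool) (gs : List String)
    (h : ∀ g, ¬(r g = true ∧ s g = true)) :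
    gs.countP (fun g => r g || s g) = gs.countP r + gs.countP s := by
  induction gs with
  | nil => simp
  | cons g t ih =>
    simp only [List.countP_cons, ih]
    cases hr : r g <;> cases hs : s g
    · simp
    · simp; omega
    · simp; omega
    · exact absurd ⟨hr, hs⟩ (h g)

-- Summing multiplicities over a duplicate-free key list equals counting occurrences.
theorem sum_counts_eq_countP (p : String → Prop) [DecidablePred p]
    (gs : List String) (ks : List String) (hnd : ks.Nodup) :
    (ks.map (fun k => if p k then (gs.count k : Int) else 0)).sum
      = (gs.countP (fun g => decide (p g) && decide (g ∈ ks)) : Int) := by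
  induction ks with
  | nil => simp
  | cons k t ih =>
    have hk : k ∉ t := (List.nodup_cons.mp hnd).1
    have hnd' : t.Nodup := (List.nodup_cons.mp hnd).2
    have hsplit : gs.countP (fun g => decide (p g) && decide (g ∈ k :: t))
        = gs.countP (fun g => decide (p g) && decide (g = k))
          + gs.countP (fun g => decide (p g) && decide (g ∈ t)) := by
      have := countP_or_disjoint (fun g => decide (p g) && decide (g = k))
        (fun g => decide (p g) && decide (g ∈ t)) gs
        (by
          intro g hg
          rcases hg with ⟨h1, h2⟩
          simp only [Bool.and_eq_true, decide_eq_true_eq] at h1 h2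
          exact hk (h1.2 ▸ h2.2))
      rw [← this]
      apply List.countP_congr
      intro g _
      simp only [List.mem_cons, Bool.and_eq_true, decide_eq_true_eq, Bool.or_eq_true]
      tauto
    have hhead : gs.countP (fun g => decide (p g) && decide (g = k))
        = if p k then gs.count k else 0 := by
      by_cases hp : p k
      · simp only [hp, if_true, List.count]
        apply List.countP_congr
        intro g _
        by_cases hgk : g = k
        · subst hgk; simp [hp]
        · simp [hgk]
      · simp only [hp, if_false]
        rw [List.countP_eq_zero]
        intro g _
        simp only [Bool.and_eq_true, decide_eq_true_eq, not_and]
        intro hpg hgk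
        exact hp (hgk ▸ hpg)
    simp only [List.map_cons, List.sum_cons, ih hnd', hsplit, hhead]
    by_cases hp : p k <;> simp [hp]

-- ===== VERDICT (by name: the statement is the Claim_ definition above) =====
theorem num_VIP_guests_spec : Claim_equal_num_VIP_guests := by
  intro vip_passes guests _
  unfold Spec_num_VIP_guests
  set vips := PySem.Set.ofList vip_passes with hv
  have hA : num_VIP_guests vip_passes guests
      = guests.foldl (fun count char => if char ∈ vips then count + 1 else count) 0 := rfl
  have hB : num_VIP_guests_alt vip_passes guests
      = (PySem.Dict.counter guests).items.foldl
          (fun total gc => if gc.1 ∈ vips then total + gc.2 else total) 0 := rfl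
  rw [hA, hB, PySem.Dict.items_counter]
  rw [foldl_if_count (fun g => g ∈ vips) guests 0]
  have hmap : ((PySem.Set.ofList guests).map (fun k => (k, (guests.count k : Int)))).foldl
      (fun total gc => if gc.1 ∈ vips then total + gc.2 else total) 0
      = ((PySem.Set.ofList guests).map (fun k => if k ∈ vips then (guests.count k : Int) else 0)).sum := by
    rw [foldl_if_add (fun g => g ∈ vips)]
    simp [List.map_map, Function.comp_def]
  rw [hmap, sum_counts_eq_countP (fun g => g ∈ vips) guests _ (PySem.Set.nodup_ofList guests)]
  rw [zero_add]
  congr 1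
  apply List.countP_congr
  intro g hg
  simp [PySem.Set.mem_ofList, hg]
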